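-- pv_equiv track=rewrite | github.com/Ressed/Tor-Botnet | datasets/data_generator.py | split_flows
-- ===== SOURCE A (Python) =====
-- def split_flows(flows, min_length=32, max_length=500, step=-1):
--     res_flows = []
--     for flow in flows:
--         length = len(flow)
--         left = 0
--         while length - left >= min_length:
--             l = min(max_length, length - left)
--             res_flows.append(flow[left: left + l])
--             left += step if step > 0 else l
--
--     for flow in res_flows:
--         start_time = abs(flow[0]) - 1
--         for i in range(len(flow)):
--             if flow[i] > 0:
--                 flow[i] -= start_time
--             else:
--                 flow[i] += start_time
--     return res_flows
-- ===== SOURCE B (Python) =====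
-- def split_flows(flows, min_length=32, max_length=500, step=-1):
--     # Consume each flow as a shrinking suffix: cut the head chunk, normalize it
--     # on the spot with a helper, then drop past it; no index bookkeeping and no
--     # second pass over the collected chunks.
--     def norm(sub):
--         st = abs(sub[0]) - 1
--         return [x - st if x > 0 else x + st for x in sub]
--
--     def chunks(rest):
--         while len(rest) >= min_length:
--             head = rest[:max_length]
--             yield norm(head)
--             rest = rest[step if step > 0 else len(head):]
--
--     return [c for flow in flows for c in chunks(flow)]
-- ===== Notes on version B (the rewrite author's own statement) =====
-- stated objective: alternative
-- what changed: B replaces A's index-arithmetic chunking loop (left pointer, l = min(max_length, length-left), slice by indices) plus a separate in-place normalization pass over the collected chunks with a generator that consumes each flow as a shrinking suffix (cut the head prefix, normalize it via a helper, drop past it), so there is no index bookkeeping and no second pass.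
-- outside the precondition, e.g. on split_flows([[-5, -1]], 0, 2, 3): A returns [[-1, 3]], B raises IndexError
import Mathlib
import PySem

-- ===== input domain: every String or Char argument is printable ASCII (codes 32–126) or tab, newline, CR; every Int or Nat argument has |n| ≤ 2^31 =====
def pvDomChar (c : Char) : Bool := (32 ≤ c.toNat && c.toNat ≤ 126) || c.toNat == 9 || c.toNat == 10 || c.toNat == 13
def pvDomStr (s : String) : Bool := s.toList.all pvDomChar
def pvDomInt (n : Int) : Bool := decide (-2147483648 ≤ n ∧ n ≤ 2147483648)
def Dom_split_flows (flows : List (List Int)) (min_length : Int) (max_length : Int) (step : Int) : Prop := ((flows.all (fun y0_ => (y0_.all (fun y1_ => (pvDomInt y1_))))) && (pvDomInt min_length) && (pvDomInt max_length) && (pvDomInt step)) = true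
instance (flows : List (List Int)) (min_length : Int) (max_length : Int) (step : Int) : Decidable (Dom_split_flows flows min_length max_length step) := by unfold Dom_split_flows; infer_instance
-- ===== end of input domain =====

-- B replaces A's index-arithmetic chunking loop plus its separate normalization pass by a
-- suffix-consuming generator that normalizes each head chunk as it is cut (objective:
-- alternative decomposition, not faster).

-- ===== PORT A =====
-- A's chunking while-loop; fuel (flow.length + 1 at the call site) only makes the
-- Python 'while' total — on Pre_ it never runs out
def pvChunkA (flow : List Int) (min_length max_length step : Int) : Nat → Int → List (List Int)
  | 0, _ => []
  | fuel + 1, left =>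
    if min_length ≤ (flow.length : Int) - left then
      let l := min max_length ((flow.length : Int) - left)
      PySem.List.slice flow (some left) (some (left + l)) ::
        pvChunkA flow min_length max_length step fuel (left + (if 0 < step then step else l))
    else []

-- A's second loop: normalize one subflow (flow[0] defaults to 0 only outside Pre_)
def pvNormA (flow : List Int) : List Int :=
  let start_time := |(PySem.List.pyGet? flow 0).getD 0| - 1
  flow.map (fun x => if 0 < x then x - start_time else x + start_time)

def split_flows (flows : List (List Int)) (min_length : Int) (max_length : Int) (step : Int) : List (List Int) :=
  (flows.foldl (fun acc flow => acc ++ pvChunkA flow min_length max_length step (flow.length + 1) 0) []).map pvNormA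

-- ===== PORT B =====
-- B's helper norm (sub[0] defaults to 0 only outside Pre_)
def pvNormB (sub : List Int) : List Int :=
  let st := |(PySem.List.pyGet? sub 0).getD 0| - 1
  sub.map (fun x => if 0 < x then x - st else x + st)

-- B's generator `chunks`: the while loop consuming the suffix `rest`; fuel
-- (rest.length + 1 at the call site) only makes it total — on Pre_ it never runs out
def pvChunksB (min_length max_length step : Int) : Nat → List Int → List (List Int)
  | 0, _ => []
  | fuel + 1, rest =>
    if min_length ≤ (rest.length : Int) then
      let head := PySem.List.slice rest none (some max_length)
      pvNormB head ::
        pvChunksB min_length max_length step fuel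
          (PySem.List.slice rest (some (if 0 < step then step else (head.length : Int))) none)
    else []

def split_flows_alt (flows : List (List Int)) (min_length : Int) (max_length : Int) (step : Int) : List (List Int) :=
  flows.flatMap (fun flow => pvChunksB min_length max_length step (flow.length + 1) flow)

-- ===== PRECONDITION & SPEC =====
-- Pre_ excludes the senseless configurations with min_length ≤ 0 or max_length ≤ 0 (and a
-- flow reaching the chunking loop): there A usually diverges (the loop stops advancing) or
-- raises IndexError on an appended empty chunk — though with min_length ≤ 0 and a positive
-- step that overshoots the flow A can still return — and B's empty head chunk raises
-- IndexError.
def Pre_split_flows (flows : List (List Int)) (min_length : Int) (max_length : Int) (step : Int) : Prop :=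
  (1 ≤ min_length ∧ 1 ≤ max_length) ∨ (∀ f ∈ flows, (f.length : Int) < min_length)
instance (flows : List (List Int)) (min_length : Int) (max_length : Int) (step : Int) : Decidable (Pre_split_flows flows min_length max_length step) := by unfold Pre_split_flows; infer_instance

def pvWitness_split_flows : List (List Int) × Int × Int × Int := ([[3, 4, 5]], 2, 2, -1)

def Spec_split_flows (flows : List (List Int)) (min_length : Int) (max_length : Int) (step : Int) (out : List (List Int)) : Prop := out = split_flows_alt flows min_length max_length step
instance (flows : List (List Int)) (min_length : Int) (max_length : Int) (step : Int) (out : List (List Int)) : Decidable (Spec_split_flows flows min_length max_length step out) := by unfold Spec_split_flows; infer_instance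

-- ===== CLAIM (what is proved, stated in full; the proofs are below) =====
def Claim_equal_split_flows : Prop := ∀ (flows : List (List Int)) (min_length : Int) (max_length : Int) (step : Int), Dom_split_flows flows min_length max_length step → Pre_split_flows flows min_length max_length step → Spec_split_flows flows min_length max_length step (split_flows flows min_length max_length step)

-- ===== LEMMAS AND PROOFS =====

-- A's chunk loop at index `left`, with the second pass mapped over it, equals B's
-- suffix loop on `flow.drop left.toNat`
lemma chunk_eq (flow : List Int) (m M s : Int) (hm : 1 ≤ m) (hM : 1 ≤ M) :
    ∀ (fuelA : Nat) (fuelB : Nat) (left : Int), 0 ≤ left →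
      (flow.length : Int) - left < fuelA → (flow.length : Int) - left < fuelB →
      (pvChunkA flow m M s fuelA left).map pvNormA
        = pvChunksB m M s fuelB (flow.drop left.toNat) := by
  intro fuelA
  induction fuelA with
  | zero =>
    intro fuelB left hl hfA hfB
    have h0 : ¬ m ≤ ((flow.drop left.toNat).length : Int) := by
      rw [List.length_drop]; omega
    cases fuelB with
    | zero => simp [pvChunkA, pvChunksB]
    | succ n =>
      simp only [pvChunkA, List.map_nil, pvChunksB]
      rw [if_neg h0]
  | succ fuelA ih =>
    intro fuelB left hl hfA hfB
    by_cases hc : m ≤ (flow.length : Int) - left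
    · -- the loop runs once more
      have hrcond : m ≤ ((flow.drop left.toNat).length : Int) := by
        rw [List.length_drop]; omega
      obtain ⟨fuelB, rfl⟩ : ∃ n, fuelB = n + 1 := ⟨fuelB - 1, by omega⟩
      have hhead : PySem.List.slice (flow.drop left.toNat) none (some M)
          = (flow.drop left.toNat).take M.toNat := by
        rw [PySem.List.slice_to]; omega
      have hheadlen : ((((flow.drop left.toNat)).take M.toNat).length : Int)
          = min M ((flow.length : Int) - left) := by
        rw [List.length_take, List.length_drop]; omega
      have hsliceA : PySem.List.slice flow (some left)
            (some (left + min M ((flow.length : Int) - left)))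
          = (flow.drop left.toNat).take M.toNat := by
        rw [PySem.List.slice_toNat]
        · apply List.take_eq_take_iff.mpr
          rw [List.length_drop]; omega
        · omega
        · omega
      have hd1 : 1 ≤ (if 0 < s then s else min M ((flow.length : Int) - left)) := by
        split_ifs <;> omega
      have hdropB : PySem.List.slice (flow.drop left.toNat)
            (some (if 0 < s then s else min M ((flow.length : Int) - left))) none
          = flow.drop (left + (if 0 < s then s else min M ((flow.length : Int) - left))).toNat := by
        rw [PySem.List.slice_from]
        · rw [List.drop_drop]; congr 1; omega
        · omega
      simp only [pvChunkA, pvChunksB]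
      rw [if_pos hc, if_pos hrcond, hhead, hheadlen, hsliceA, List.map_cons]
      congr 1
      rw [hdropB]
      exact ih fuelB (left + (if 0 < s then s else min M ((flow.length : Int) - left)))
          (by omega) (by omega) (by omega)
    · -- the loop is over
      have h0 : ¬ m ≤ ((flow.drop left.toNat).length : Int) := by
        rw [List.length_drop]; omega
      cases fuelB with
      | zero => simp [pvChunkA, if_neg hc, pvChunksB]
      | succ n =>
        simp only [pvChunkA, pvChunksB]
        rw [if_neg hc, if_neg h0, List.map_nil]

-- ===== VERDICT (by name: the statement is the Claim_ definition above) =====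
theorem split_flows_spec : Claim_equal_split_flows := by
  intro flows m M s _ hpre
  unfold Spec_split_flows split_flows split_flows_alt
  rw [PySem.List.foldl_append_eq_flatMap]
  simp only [List.nil_append, List.map_flatMap]
  rcases hpre with ⟨hm, hM⟩ | hshort
  · congr 1
    funext flow
    have := chunk_eq flow m M s hm hM (flow.length + 1) (flow.length + 1) 0 le_rfl
      (by push_cast; omega) (by push_cast; omega)
    simpa using this
  · -- every flow is shorter than min_length: both sides are empty
    rw [List.flatMap_eq_nil_iff.mpr, List.flatMap_eq_nil_iff.mpr]
    · intro f hf
      have := hshort f hf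
      simp only [pvChunksB]
      rw [if_neg (by omega)]
    · intro f hf
      have := hshort f hf
      simp only [pvChunkA]
      rw [if_neg (by omega), List.map_nil]
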